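-- pv_equiv track=rewrite | github.com/omer1998/DSA-MOOC-FI | week2/listrounds.py | find_rounds
-- ===== SOURCE A (Python) =====
-- def find_rounds(numbers:list):
--     # collect the number from list in order from small to large
--     # Each round goes through the list from left to right and collects a number
--     # if it is the next number to be collected.
--     #
--     # The process ends when all numbers have been collected.
--     all_subsets=[]
--     rounds_count = 0
--
--     # get the smallest element
--     new_numbers= numbers
--     while len(new_numbers) >0 :
--         small_num, index = (numbers[0],0)
--         sub_set = []
--         # get the small num
--         for i in range(len(new_numbers)):
--
--             if new_numbers[i] < small_num:
--                 small_num = new_numbers[i]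
--                 index = new_numbers.index(small_num)
--         sub_set.append(small_num)
--         # new_numbers.remove(small_num)
--         # numbers_length = len(new_numbers)
--         ind = index
--         while ind < len(new_numbers):
--
--             if new_numbers[ind] == small_num +1 :
--                 sub_set.append(new_numbers[ind])
--                 small_num = new_numbers[ind]
--
--
--             else:
--                 ind += 1
--         all_subsets.append(sub_set)
--         rounds_count +=1
--         for ss in sub_set:
--             new_numbers.remove(ss)
--
--
--
--
--         # new_numbers.remove(small_num)
--     return all_subsets, rounds_count
-- ===== SOURCE B (Python) =====
-- def find_rounds(numbers: list):
--     # Bucket the positions of each value once, then simulate the rounds with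
--     # per-value start pointers and binary search instead of rescanning and
--     # physically removing elements from the list.
--     # (The original empties its argument list in place; this version does not
--     # mutate it -- the equivalence is about the return value.)
--     pos = {}
--     for i, v in enumerate(numbers):
--         pos.setdefault(v, []).append(i)
--     vals = sorted(pos)
--     start = {v: 0 for v in pos}
--     all_subsets = []
--     remaining = len(numbers)
--     ptr = 0
--     while remaining > 0:
--         while start[vals[ptr]] == len(pos[vals[ptr]]):
--             ptr += 1
--         v = vals[ptr]
--         p = pos[v][start[v]]
--         chain = [v]
--         while True:
--             nxt = v + 1
--             if nxt not in pos:
--                 break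
--             lst = pos[nxt]
--             j = first_greater(lst, p, start[nxt])
--             if j >= len(lst):
--                 break
--             chain.append(nxt)
--             p = lst[j]
--             v = nxt
--         for u in chain:
--             start[u] += 1
--         remaining -= len(chain)
--         all_subsets.append(chain)
--     return all_subsets, len(all_subsets)
--
--
-- def first_greater(lst, p, lo):
--     # smallest j with lo <= j < len(lst) and lst[j] > p, else len(lst)
--     hi = len(lst)
--     while lo < hi:
--         mid = (lo + hi) // 2
--         if lst[mid] > p:
--             hi = mid
--         else:
--             lo = mid + 1
--     return lo
-- ===== Notes on version B (the rewrite author's own statement) =====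
-- stated objective: faster
-- what changed: Instead of repeatedly rescanning the list for the minimum, walking it for each chain and calling list.remove per collected element, B buckets the positions of every value once, keeps a per-value start pointer (removals become pointer bumps), finds each round's minimum with a single monotone pointer over the sorted distinct values, and extends a chain by binary-searching the next value's position list.
import Mathlib
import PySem

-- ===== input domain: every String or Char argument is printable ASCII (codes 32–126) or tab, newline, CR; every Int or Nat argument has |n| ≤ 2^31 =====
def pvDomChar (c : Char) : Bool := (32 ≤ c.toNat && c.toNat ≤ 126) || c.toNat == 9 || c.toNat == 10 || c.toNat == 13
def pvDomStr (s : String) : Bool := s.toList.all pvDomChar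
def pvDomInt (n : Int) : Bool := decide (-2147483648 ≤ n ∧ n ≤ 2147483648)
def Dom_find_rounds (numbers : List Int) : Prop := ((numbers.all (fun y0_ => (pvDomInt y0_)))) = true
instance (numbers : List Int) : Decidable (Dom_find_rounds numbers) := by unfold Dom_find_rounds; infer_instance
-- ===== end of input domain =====

-- B is a different algorithm (per-value position buckets + pointers + binary search instead of
-- repeated scanning/removal); A empties its argument list in place, B does not mutate it —
-- the equivalence proved here is about the return value.

-- ===== PORT A =====

-- the 'for i in range(len(new_numbers))' minimum scan of A (state: (small_num, index))
def pvMinFold (xs : List Int) : Int × Nat :=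
  (PySem.List.pyRange 0 (PySem.List.len xs) 1).foldl
    (fun st j =>
      if PySem.List.pyGetD xs j 0 < st.1 then
        (PySem.List.pyGetD xs j 0, (PySem.List.index? xs (PySem.List.pyGetD xs j 0)).getD 0)
      else st)
    (PySem.List.pyGetD xs 0 0, 0)

-- A's quirky inner 'while ind < len(new_numbers)' (ind does not advance on a hit,
-- but then the test is false on the next pass, so the measure below decreases)
def pvChainA (xs : List Int) (ind : Nat) (small : Int) : List Int :=
  if h : ind < xs.length then
    if hc : PySem.List.pyGetD xs (ind : Int) 0 = small + 1 then
      PySem.List.pyGetD xs (ind : Int) 0 :: pvChainA xs ind (PySem.List.pyGetD xs (ind : Int) 0)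
    else
      pvChainA xs (ind + 1) small
  else []
termination_by (xs.length - ind) * 2 + (if PySem.List.pyGetD xs (ind : Int) 0 = small + 1 then 1 else 0)
decreasing_by
  · have h1 : ¬ (PySem.List.pyGetD xs (ind : Int) 0 = PySem.List.pyGetD xs (ind : Int) 0 + 1) := by omega
    rw [if_neg h1, if_pos hc]
    omega
  · rw [if_neg hc]
    split <;> omega

-- 'for ss in sub_set: new_numbers.remove(ss)'; on every state A reaches, ss is present,
-- so remove? is some and the .getD default is never used
def pvRemoveAll (xs : List Int) (sub : List Int) : List Int :=
  sub.foldl (fun ys ss => (PySem.List.remove? ys ss).getD ys) xs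

theorem pvMinFold_fst_mem (xs : List Int) (h : xs ≠ []) : (pvMinFold xs).1 ∈ xs := by
  have hconv : pvMinFold xs =
      xs.foldl (fun st x => if x < st.1 then (x, (PySem.List.index? xs x).getD 0) else st)
        (PySem.List.pyGetD xs 0 0, 0) := by
    unfold pvMinFold
    exact PySem.List.foldl_pyRange_zero_pyGetD xs 0
      (fun st x => if x < st.1 then (x, (PySem.List.index? xs x).getD 0) else st) _
  have hfst : ∀ (l : List Int) (st : Int × Nat),
      (l.foldl (fun st x => if x < st.1 then (x, (PySem.List.index? xs x).getD 0) else st) st).1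
        = l.foldl min st.1 := by
    intro l
    induction l with
    | nil => intro st; rfl
    | cons x t ih =>
        intro st
        rw [List.foldl_cons, List.foldl_cons]
        by_cases hx : x < st.1
        · rw [if_pos hx, ih, min_eq_right (le_of_lt hx)]
        · rw [if_neg hx, ih, min_eq_left (not_lt.mp hx)]
  rw [hconv, hfst]
  have h0 : PySem.List.pyGetD xs 0 0 ∈ xs := by
    cases xs with
    | nil => exact absurd rfl h
    | cons a t => simp [PySem.List.pyGetD_zero_cons]
  rcases (PySem.List.foldl_min_mem xs (PySem.List.pyGetD xs 0 0)) with h1 | h1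
  · rw [h1]; exact h0
  · exact h1

theorem pvRemoveAll_length_le (sub : List Int) : ∀ (xs : List Int),
    (pvRemoveAll xs sub).length ≤ xs.length := by
  induction sub with
  | nil => intro xs; simp [pvRemoveAll]
  | cons s t ih =>
      intro xs
      show (pvRemoveAll ((PySem.List.remove? xs s).getD xs) t).length ≤ xs.length
      refine le_trans (ih _) ?_
      by_cases hm : s ∈ xs
      · rw [PySem.List.remove?_eq_some_erase xs s hm]
        simpa using (List.length_erase_le : (xs.erase s).length ≤ xs.length)
      · rw [(PySem.List.remove?_eq_none_iff xs s).mpr hm]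
        simp
theorem pvRemoveAll_length_lt (xs : List Int) (v : Int) (rest : List Int) (hv : v ∈ xs) :
    (pvRemoveAll xs (v :: rest)).length < xs.length := by
  show (pvRemoveAll ((PySem.List.remove? xs v).getD xs) rest).length < xs.length
  refine lt_of_le_of_lt (pvRemoveAll_length_le rest _) ?_
  rw [PySem.List.remove?_eq_some_erase xs v hv]
  have h1 := List.length_erase_of_mem hv
  have h2 : 1 ≤ xs.length := List.length_pos_of_mem hv
  simp only [Option.getD_some]
  omega

-- the outer 'while len(new_numbers) > 0' of A
def pvRoundsA (xs : List Int) (subsets : List (List Int)) (cnt : Int) : List (List Int) × Int :=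
  if h : 0 < xs.length then
    let st := pvMinFold xs
    let sub := st.1 :: pvChainA xs st.2 st.1
    pvRoundsA (pvRemoveAll xs sub) (subsets ++ [sub]) (cnt + 1)
  else (subsets, cnt)
termination_by xs.length
decreasing_by
  exact pvRemoveAll_length_lt xs _ _ (pvMinFold_fst_mem xs (by intro hnil; simp [hnil] at h))

def find_rounds (numbers : List Int) : List (List Int) × Int :=
  pvRoundsA numbers [] 0

-- ===== PORT B =====

-- first_greater's 'while lo < hi' binary search ((lo+hi)//2 on nonnegative ints)
def pvFG (lst : List Int) (p : Int) (lo hi : Int) : Int :=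
  if h : lo < hi then
    if p < PySem.List.pyGetD lst (PySem.Int.floordiv (lo + hi) 2) 0 then
      pvFG lst p lo (PySem.Int.floordiv (lo + hi) 2)
    else
      pvFG lst p (PySem.Int.floordiv (lo + hi) 2 + 1) hi
  else lo
termination_by (hi - lo).toNat
decreasing_by
  · have := PySem.Int.floordiv_two_mid_bounds (le_of_lt h)
    have h2 : PySem.Int.floordiv (lo + hi) 2 < hi := by
      have : PySem.Int.floordiv (lo + hi) 2 < hi ↔ lo + hi < hi * 2 :=
        PySem.Int.floordiv_lt_iff_lt_mul (by omega)
      omega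
    omega
  · have := PySem.Int.floordiv_two_mid_bounds (le_of_lt h)
    omega

def pvFirstGreater (lst : List Int) (p : Int) (lo : Int) : Int :=
  pvFG lst p lo (PySem.List.len lst)

-- pos.setdefault(v, []).append(i) over enumerate(numbers)
def pvBuildPos (numbers : List Int) : PySem.Dict Int (List Int) :=
  (PySem.List.enumerate numbers 0).foldl
    (fun d e => d.modify e.2 [] (fun l => l ++ [e.1])) PySem.Dict.empty

-- start = {v: 0 for v in pos}
def pvBuildStart (keys : List Int) : PySem.Dict Int Int :=
  keys.foldl (fun d v => d.insert v 0) PySem.Dict.empty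

-- 'while start[vals[ptr]] == len(pos[vals[ptr]]): ptr += 1'
-- (the out-of-range else-branch below is where Python would raise IndexError; it is
-- unreachable from find_rounds_alt's states)
def pvSkip (pos : PySem.Dict Int (List Int)) (start : PySem.Dict Int Int)
    (vals : List Int) (ptr : Nat) : Nat :=
  if h : ptr < vals.length then
    if start.getD (PySem.List.pyGetD vals (ptr : Int) 0) 0 =
        PySem.List.len (pos.getD (PySem.List.pyGetD vals (ptr : Int) 0) []) then
      pvSkip pos start vals (ptr + 1)
    else ptr
  else ptr
termination_by vals.length - ptr

theorem pvFilterLtLen (l : List Int) (v : Int) (hv : v + 1 ∈ l) :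
    (l.filter (fun k => decide (v + 1 < k))).length < (l.filter (fun k => decide (v < k))).length := by
  obtain ⟨l1, l2, rfl⟩ := List.append_of_mem hv
  have m1 : (l1.filter (fun k => decide (v + 1 < k))).length ≤ (l1.filter (fun k => decide (v < k))).length := by
    rw [← List.countP_eq_length_filter, ← List.countP_eq_length_filter]
    exact List.countP_mono_left (by intro a _ ha; simp at ha ⊢; omega)
  have m2 : (l2.filter (fun k => decide (v + 1 < k))).length ≤ (l2.filter (fun k => decide (v < k))).length := by
    rw [← List.countP_eq_length_filter, ← List.countP_eq_length_filter]
    exact List.countP_mono_left (by intro a _ ha; simp at ha ⊢; omega)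
  simp only [List.filter_append, List.filter_cons, List.length_append]
  norm_num
  omega

-- the 'while True' chain loop of B; chain.append(nxt) becomes consing nxt onto the rest
def pvChainB (pos : PySem.Dict Int (List Int)) (start : PySem.Dict Int Int)
    (v p : Int) : List Int :=
  if hc : pos.contains (v + 1) then
    if PySem.List.len (pos.getD (v + 1) []) ≤
        pvFirstGreater (pos.getD (v + 1) []) p (start.getD (v + 1) 0) then
      []
    else
      (v + 1) :: pvChainB pos start (v + 1)
        (PySem.List.pyGetD (pos.getD (v + 1) [])
          (pvFirstGreater (pos.getD (v + 1) []) p (start.getD (v + 1) 0)) 0)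
  else []
termination_by ((pos.keys).filter (fun k => decide (v < k))).length
decreasing_by
  exact pvFilterLtLen pos.keys v ((PySem.Dict.contains_iff_mem_keys pos (v + 1)).mp hc)

-- the outer 'while remaining > 0' of B
def pvRoundsB (pos : PySem.Dict Int (List Int)) (vals : List Int)
    (start : PySem.Dict Int Int) (subsets : List (List Int))
    (remaining : Int) (ptr : Nat) : List (List Int) :=
  if h : 0 < remaining then
    let k := pvSkip pos start vals ptr
    let v := PySem.List.pyGetD vals (k : Int) 0
    let p := PySem.List.pyGetD (pos.getD v []) (start.getD v 0) 0
    let chain := v :: pvChainB pos start v p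
    pvRoundsB pos vals (chain.foldl (fun d u => d.insert u (d.getD u 0 + 1)) start)
      (subsets ++ [chain]) (remaining - PySem.List.len chain) k
  else subsets
termination_by remaining.toNat
decreasing_by
  rw [PySem.List.len_eq]
  simp only [List.length_cons]
  omega

def find_rounds_alt (numbers : List Int) : List (List Int) × Int :=
  let pos := pvBuildPos numbers
  let vals := PySem.List.sorted pos.keys (fun x => x) false
  let start := pvBuildStart pos.keys
  let res := pvRoundsB pos vals start [] (PySem.List.len numbers) 0
  (res, PySem.List.len res)

-- ===== PRECONDITION & SPEC =====
def Spec_find_rounds (numbers : List Int) (out : List (List Int) × Int) : Prop := out = find_rounds_alt numbers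
instance (numbers : List Int) (out : List (List Int) × Int) : Decidable (Spec_find_rounds numbers out) := by unfold Spec_find_rounds; infer_instance

-- ===== CLAIM (what is proved, stated in full; the proofs are below) =====
def Claim_equal_find_rounds : Prop := ∀ (numbers : List Int), Dom_find_rounds numbers → Spec_find_rounds numbers (find_rounds numbers)

-- ===== LEMMAS AND PROOFS =====

-- Abstraction layer: positions of each value, the 'active' pairs under a start dict,
-- and the list A is working on.
def posL (numbers : List Int) (v : Int) : List Int :=
  ((PySem.List.enumerate numbers 0).filter (fun e => e.2 == v)).map (fun e => e.1)

def sN (start : PySem.Dict Int Int) (v : Int) : Nat := (start.getD v 0).toNat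

def actE (numbers : List Int) (start : PySem.Dict Int Int) (e : Int × Int) : Bool :=
  decide (e.1 ∈ (posL numbers e.2).drop (sN start e.2))

def LPf (numbers : List Int) (start : PySem.Dict Int Int) : List (Int × Int) :=
  (PySem.List.enumerate numbers 0).filter (actE numbers start)

def absL (numbers : List Int) (start : PySem.Dict Int Int) : List Int :=
  (LPf numbers start).map (fun e => e.2)

theorem mem_posL (numbers : List Int) (v q : Int) :
    q ∈ posL numbers v ↔ (q, v) ∈ PySem.List.enumerate numbers 0 := by
  constructor
  · intro h
    simp only [posL, List.mem_map, List.mem_filter] at h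
    obtain ⟨e, ⟨he, hv⟩, hq⟩ := h
    have : e = (q, v) := by
      cases e; simp at hv hq; simp [hq, hv]
    rwa [this] at he
  · intro h
    simp only [posL, List.mem_map, List.mem_filter]
    exact ⟨(q, v), ⟨h, by simp⟩, rfl⟩

theorem enum_fst_inj (numbers : List Int) (q w w' : Int)
    (h1 : (q, w) ∈ PySem.List.enumerate numbers 0)
    (h2 : (q, w') ∈ PySem.List.enumerate numbers 0) : w = w' := by
  rw [PySem.List.mem_enumerate_iff] at h1 h2
  obtain ⟨k1, hk1, he1⟩ := h1
  obtain ⟨k2, hk2, he2⟩ := h2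
  have hq1 : q = (k1 : Int) := by simpa using congrArg Prod.fst he1
  have hq2 : q = (k2 : Int) := by simpa using congrArg Prod.fst he2
  have hk : k1 = k2 := by omega
  subst hk
  have h1 : w = numbers[k1] := by simpa using congrArg Prod.snd he1
  have h2 : w' = numbers[k1] := by simpa using congrArg Prod.snd he2
  rw [h1, h2]

theorem snd_mem_of_mem_enum (numbers : List Int) (e : Int × Int)
    (h : e ∈ PySem.List.enumerate numbers 0) : e.2 ∈ numbers := by
  rw [PySem.List.mem_enumerate_iff] at h
  obtain ⟨k, hk, he⟩ := h
  subst he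
  exact List.getElem_mem hk

theorem posL_pairwise (numbers : List Int) (v : Int) :
    (posL numbers v).Pairwise (· < ·) := by
  unfold posL
  exact List.Pairwise.map _ (fun a b h => h)
    ((PySem.List.pairwise_lt_enumerate numbers 0).filter _)

theorem LPf_pairwise (numbers : List Int) (start : PySem.Dict Int Int) :
    (LPf numbers start).Pairwise (fun a b => a.1 < b.1) :=
  (PySem.List.pairwise_lt_enumerate numbers 0).filter _

theorem mem_LPf (numbers : List Int) (start : PySem.Dict Int Int) (e : Int × Int) :
    e ∈ LPf numbers start ↔
      e ∈ PySem.List.enumerate numbers 0 ∧ e.1 ∈ (posL numbers e.2).drop (sN start e.2) := by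
  simp [LPf, List.mem_filter, actE]

theorem mem_LPf_of_drop (numbers : List Int) (start : PySem.Dict Int Int) (v q : Int)
    (h : q ∈ (posL numbers v).drop (sN start v)) : (q, v) ∈ LPf numbers start := by
  rw [mem_LPf]
  refine ⟨(mem_posL numbers v q).mp (List.mem_of_mem_drop h), h⟩

theorem firstPairSplit (numbers : List Int) (start : PySem.Dict Int Int) (u : Int)
    (h : (posL numbers u).drop (sN start u) ≠ []) :
    ∃ La Lb, LPf numbers start = La ++ ((posL numbers u).getD (sN start u) 0, u) :: Lb ∧
      (∀ e ∈ La, e.2 ≠ u) ∧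
      (∀ e ∈ La, e.1 < (posL numbers u).getD (sN start u) 0) ∧
      (∀ e ∈ Lb, (posL numbers u).getD (sN start u) 0 < e.1) ∧
      (posL numbers u).drop (sN start u)
        = (posL numbers u).getD (sN start u) 0 :: (posL numbers u).drop (sN start u + 1) := by
  have hs : sN start u < (posL numbers u).length := by
    by_contra hc
    exact h (List.drop_eq_nil_of_le (le_of_not_gt hc))
  have hp0 : (posL numbers u).getD (sN start u) 0 = (posL numbers u)[sN start u] :=
    List.getD_eq_getElem _ _ hs
  have hdrop : (posL numbers u).drop (sN start u)
      = (posL numbers u).getD (sN start u) 0 :: (posL numbers u).drop (sN start u + 1) := by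
    rw [hp0]; exact List.drop_eq_getElem_cons hs
  have hmemdrop : (posL numbers u).getD (sN start u) 0 ∈ (posL numbers u).drop (sN start u) := by
    rw [hdrop]; exact List.mem_cons_self
  have hmem : ((posL numbers u).getD (sN start u) 0, u) ∈ LPf numbers start :=
    mem_LPf_of_drop numbers start u _ hmemdrop
  obtain ⟨La, Lb, hsplit⟩ := List.append_of_mem hmem
  have hpw := LPf_pairwise numbers start
  rw [hsplit] at hpw
  rw [List.pairwise_append] at hpw
  obtain ⟨_, hpwR, hcross⟩ := hpw
  have hlt : ∀ e ∈ La, e.1 < (posL numbers u).getD (sN start u) 0 := by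
    intro e he
    exact hcross e he _ List.mem_cons_self
  have hgt : ∀ e ∈ Lb, (posL numbers u).getD (sN start u) 0 < e.1 := by
    intro e he
    exact (List.pairwise_cons.mp hpwR).1 e he
  refine ⟨La, Lb, hsplit, ?_, hlt, hgt, hdrop⟩
  intro e he hu
  have heL : e ∈ LPf numbers start := by
    rw [hsplit]; exact List.mem_append_left _ he
  have hact := (mem_LPf numbers start e).mp heL
  rw [hu] at hact
  have he1 : e.1 ∈ (posL numbers u).drop (sN start u) := hact.2
  rw [hdrop] at he1
  have hpwdrop : ((posL numbers u).getD (sN start u) 0 :: (posL numbers u).drop (sN start u + 1)).Pairwise (· < ·) := by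
    rw [← hdrop]
    exact (posL_pairwise numbers u).drop
  rcases List.mem_cons.mp he1 with h1 | h1
  · exact absurd h1 (ne_of_lt (hlt e he))
  · have := (List.pairwise_cons.mp hpwdrop).1 e.1 h1
    exact absurd this (not_lt.mpr (le_of_lt (hlt e he)))

theorem rem_step (numbers : List Int) (start : PySem.Dict Int Int) (u : Int)
    (h : (posL numbers u).drop (sN start u) ≠ []) (hnn : ∀ v, 0 ≤ start.getD v 0) :
    PySem.List.remove? (absL numbers start) u
        = some (absL numbers (start.insert u (start.getD u 0 + 1))) ∧
      (absL numbers (start.insert u (start.getD u 0 + 1))).length + 1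
        = (absL numbers start).length := by
  obtain ⟨La, Lb, hsplit, hneU, hlt, hgt, hdrop⟩ := firstPairSplit numbers start u h
  have hsN_self : sN (start.insert u (start.getD u 0 + 1)) u = sN start u + 1 := by
    unfold sN
    rw [PySem.Dict.getD_insert_self]
    have := hnn u
    omega
  have hsN_ne : ∀ w, w ≠ u → sN (start.insert u (start.getD u 0 + 1)) w = sN start w := by
    intro w hw
    unfold sN
    rw [PySem.Dict.getD_insert_of_ne start _ 0 hw]
  have hp0mem : ((posL numbers u).getD (sN start u) 0, u) ∈ PySem.List.enumerate numbers 0 := by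
    apply (mem_posL numbers u _).mp
    exact List.mem_of_mem_drop (by rw [hdrop]; exact List.mem_cons_self)
  have hp0notin : (posL numbers u).getD (sN start u) 0 ∉ (posL numbers u).drop (sN start u + 1) := by
    intro hc
    have hpwdrop : ((posL numbers u).getD (sN start u) 0 :: (posL numbers u).drop (sN start u + 1)).Pairwise (· < ·) := by
      rw [← hdrop]; exact (posL_pairwise numbers u).drop
    have := (List.pairwise_cons.mp hpwdrop).1 _ hc
    exact lt_irrefl _ this
  have hfilter : LPf numbers (start.insert u (start.getD u 0 + 1))
      = (LPf numbers start).filter (fun e => decide (e.1 ≠ (posL numbers u).getD (sN start u) 0)) := by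
    unfold LPf
    rw [List.filter_filter]
    apply List.filter_congr
    intro e he
    by_cases hu : e.2 = u
    · simp only [actE, hu, hsN_self]
      rw [← Bool.decide_and, decide_eq_decide]
      rw [hdrop]
      constructor
      · intro hm
        constructor
        · intro hc; rw [hc] at hm; exact hp0notin hm
        · exact List.mem_cons_of_mem _ hm
      · rintro ⟨hne, hm⟩
        rcases List.mem_cons.mp hm with h1 | h1
        · exact absurd h1 hne
        · exact h1
    · simp only [actE, hsN_ne e.2 hu]
      rw [← Bool.decide_and, decide_eq_decide]
      constructor
      · intro hm
        refine ⟨?_, hm⟩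
        intro hc
        have he2 : (e.1, e.2) ∈ PySem.List.enumerate numbers 0 := by
          simpa using he
        rw [hc] at he2
        exact hu (enum_fst_inj numbers _ e.2 u he2 hp0mem)
      · rintro ⟨_, hm⟩
        exact hm
  -- now compute the filtered decomposition and the erase
  have hxs : absL numbers start
      = La.map (fun e => e.2) ++ u :: Lb.map (fun e => e.2) := by
    unfold absL
    rw [hsplit]
    simp
  have hnotinLa : u ∉ La.map (fun e => e.2) := by
    intro hc
    obtain ⟨e, he, he2⟩ := List.mem_map.mp hc
    exact hneU e he he2
  have habs' : absL numbers (start.insert u (start.getD u 0 + 1))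
      = La.map (fun e => e.2) ++ Lb.map (fun e => e.2) := by
    unfold absL
    rw [hfilter, hsplit]
    rw [List.filter_append, List.filter_cons]
    have hLa : La.filter (fun e => decide (e.1 ≠ (posL numbers u).getD (sN start u) 0)) = La := by
      apply List.filter_eq_self.mpr
      intro e he
      simpa using ne_of_lt (hlt e he)
    have hLb : Lb.filter (fun e => decide (e.1 ≠ (posL numbers u).getD (sN start u) 0)) = Lb := by
      apply List.filter_eq_self.mpr
      intro e he
      simpa using (ne_of_gt (hgt e he))
    rw [hLa, hLb]
    simp
  constructor
  · have hmemu : u ∈ absL numbers start := by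
      rw [hxs]
      exact List.mem_append_right _ List.mem_cons_self
    rw [PySem.List.remove?_eq_some_erase _ _ hmemu, hxs, habs']
    rw [List.erase_append_right _ hnotinLa, List.erase_cons_head]
  · rw [hxs, habs']
    simp
    omega

theorem removeAll_bridge (numbers : List Int) (chain : List Int) : ∀ (start : PySem.Dict Int Int),
    chain.Nodup → (∀ u ∈ chain, (posL numbers u).drop (sN start u) ≠ []) →
    (∀ v, 0 ≤ start.getD v 0) → (∀ v, sN start v ≤ (posL numbers v).length) →
    pvRemoveAll (absL numbers start) chain
        = absL numbers (chain.foldl (fun d u => d.insert u (d.getD u 0 + 1)) start) ∧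
      (absL numbers (chain.foldl (fun d u => d.insert u (d.getD u 0 + 1)) start)).length + chain.length
        = (absL numbers start).length ∧
      (∀ v, 0 ≤ (chain.foldl (fun d u => d.insert u (d.getD u 0 + 1)) start).getD v 0) ∧
      (∀ v, v ∉ chain → (chain.foldl (fun d u => d.insert u (d.getD u 0 + 1)) start).getD v 0 = start.getD v 0) ∧
      (∀ v, sN (chain.foldl (fun d u => d.insert u (d.getD u 0 + 1)) start) v ≤ (posL numbers v).length) := by
  induction chain with
  | nil =>
      intro start _ _ hnn hle
      exact ⟨rfl, by simp, hnn, fun v _ => rfl, hle⟩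
  | cons u rest ih =>
      intro start hnd hact hnn hle
      have hau : (posL numbers u).drop (sN start u) ≠ [] := hact u List.mem_cons_self
      obtain ⟨hrem, hlen1⟩ := rem_step numbers start u hau hnn
      have hsu : sN start u < (posL numbers u).length := by
        by_contra hc
        exact hau (List.drop_eq_nil_of_le (le_of_not_gt hc))
      have hnn1 : ∀ v, 0 ≤ (start.insert u (start.getD u 0 + 1)).getD v 0 := by
        intro v
        by_cases hv : v = u
        · subst hv; rw [PySem.Dict.getD_insert_self]; have := hnn v; omega
        · rw [PySem.Dict.getD_insert_of_ne start _ 0 hv]; exact hnn v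
      have hsN_self : sN (start.insert u (start.getD u 0 + 1)) u = sN start u + 1 := by
        unfold sN; rw [PySem.Dict.getD_insert_self]; have := hnn u; omega
      have hsN_ne : ∀ w, w ≠ u → sN (start.insert u (start.getD u 0 + 1)) w = sN start w := by
        intro w hw; unfold sN; rw [PySem.Dict.getD_insert_of_ne start _ 0 hw]
      have hle1 : ∀ v, sN (start.insert u (start.getD u 0 + 1)) v ≤ (posL numbers v).length := by
        intro v
        by_cases hv : v = u
        · subst hv; rw [hsN_self]; omega
        · rw [hsN_ne v hv]; exact hle v
      have hact1 : ∀ w ∈ rest, (posL numbers w).drop (sN (start.insert u (start.getD u 0 + 1)) w) ≠ [] := by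
        intro w hw
        have hwne : w ≠ u := by
          intro hc; subst hc; exact (List.nodup_cons.mp hnd).1 hw
        rw [hsN_ne w hwne]
        exact hact w (List.mem_cons_of_mem _ hw)
      obtain ⟨e1, e2, e3, e4, e5⟩ := ih (start.insert u (start.getD u 0 + 1))
        (List.nodup_cons.mp hnd).2 hact1 hnn1 hle1
      have hstep : pvRemoveAll (absL numbers start) (u :: rest)
          = pvRemoveAll (absL numbers (start.insert u (start.getD u 0 + 1))) rest := by
        show pvRemoveAll ((PySem.List.remove? (absL numbers start) u).getD (absL numbers start)) rest = _
        rw [hrem]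
        rfl
      refine ⟨by rw [hstep]; exact e1, by simp only [List.foldl_cons]; simp only [List.length_cons]; omega, ?_, ?_, ?_⟩
      · simpa using e3
      · intro v hv
        have hv1 : v ∉ rest := fun hc => hv (List.mem_cons_of_mem _ hc)
        have hvu : v ≠ u := fun hc => hv (hc ▸ List.mem_cons_self)
        have := e4 v hv1
        simp only [List.foldl_cons]
        rw [this, PySem.Dict.getD_insert_of_ne start _ 0 hvu]
      · simpa using e5

-- the value sequence a round collects after its minimum, read off a plain scan
def chainS (v : Int) : List Int → List Int
  | [] => []
  | x :: t => if x = v + 1 then (v + 1) :: chainS (v + 1) t else chainS v t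

theorem pvChainA_eq (xs : List Int) (ind : Nat) (small : Int) :
    pvChainA xs ind small = chainS small (xs.drop ind) := by
  fun_induction pvChainA xs ind small with
  | case1 ind small h hc ih =>
      have hget : PySem.List.pyGetD xs (ind : Int) 0 = xs[ind] := by
        rw [PySem.List.pyGetD_natCast]
        exact List.getD_eq_getElem _ _ h
      have hdrop : xs.drop ind = xs[ind] :: xs.drop (ind + 1) := List.drop_eq_getElem_cons h
      rw [hget] at hc
      rw [ih, hget, hdrop, hc]
      simp only [chainS]
      simp
  | case2 ind small h hc ih =>
      have hget : PySem.List.pyGetD xs (ind : Int) 0 = xs[ind] := by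
        rw [PySem.List.pyGetD_natCast]
        exact List.getD_eq_getElem _ _ h
      have hdrop : xs.drop ind = xs[ind] :: xs.drop (ind + 1) := List.drop_eq_getElem_cons h
      rw [ih, hdrop, chainS, if_neg (by rw [← hget]; exact hc)]
  | case3 ind small h =>
      rw [List.drop_eq_nil_of_le (le_of_not_gt h), chainS]

theorem chainS_gt : ∀ (l : List Int) (v w : Int), w ∈ chainS v l → v < w := by
  intro l
  induction l with
  | nil => intro v w h; simp [chainS] at h
  | cons x t ih =>
      intro v w h
      rw [chainS] at h
      split at h
      · rcases List.mem_cons.mp h with h1 | h1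
        · omega
        · have := ih _ _ h1; omega
      · exact ih _ _ h

theorem chainS_sub : ∀ (l : List Int) (v : Int), chainS v l ⊆ l := by
  intro l
  induction l with
  | nil => intro v; simp [chainS]
  | cons x t ih =>
      intro v
      rw [chainS]
      split
      · rename_i hx
        intro w hw
        rcases List.mem_cons.mp hw with h1 | h1
        · rw [h1, ← hx]; exact List.mem_cons_self
        · exact List.mem_cons_of_mem _ (ih _ h1)
      · intro w hw
        exact List.mem_cons_of_mem _ (ih _ hw)

theorem chainS_pairwise : ∀ (l : List Int) (v : Int), (chainS v l).Pairwise (· < ·) := by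
  intro l
  induction l with
  | nil => intro v; simp [chainS]
  | cons x t ih =>
      intro v
      rw [chainS]
      split
      · exact List.pairwise_cons.mpr ⟨fun w hw => chainS_gt t _ w hw, ih _⟩
      · exact ih v

theorem chainS_none : ∀ (l : List Int) (v : Int), (v + 1) ∉ l → chainS v l = [] := by
  intro l
  induction l with
  | nil => intro v _; rfl
  | cons x t ih =>
      intro v hv
      rw [chainS, if_neg (by intro hc; exact hv (hc ▸ List.mem_cons_self))]
      exact ih v (fun hc => hv (List.mem_cons_of_mem _ hc))

theorem chainS_split (v : Int) (l1 l2 : List Int) (h : (v + 1) ∉ l1) :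
    chainS v (l1 ++ (v + 1) :: l2) = (v + 1) :: chainS (v + 1) l2 := by
  induction l1 with
  | nil => simp [chainS]
  | cons x t ih =>
      have hx : ¬ (x = v + 1) := fun hc => h (hc ▸ List.mem_cons_self)
      rw [List.cons_append, chainS, if_neg hx]
      exact ih (fun hc => h (List.mem_cons_of_mem _ hc))

-- first occurrence (by second component) split of a pair list
theorem firstSndSplit : ∀ (L : List (Int × Int)) (w : Int), w ∈ L.map (fun e => e.2) →
    ∃ q l1 l2, L = l1 ++ (q, w) :: l2 ∧ w ∉ l1.map (fun e => e.2) := by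
  intro L
  induction L with
  | nil => intro w h; simp at h
  | cons e t ih =>
      intro w h
      by_cases he : e.2 = w
      · exact ⟨e.1, [], t, by simp [← he], by simp⟩
      · have hw : w ∈ t.map (fun e => e.2) := by
          rcases List.mem_map.mp h with ⟨a, ha, ha2⟩
          rcases List.mem_cons.mp ha with h1 | h1
          · exact absurd (h1 ▸ ha2) he
          · exact List.mem_map.mpr ⟨a, h1, ha2⟩
        obtain ⟨q, l1, l2, hsplit, hnot⟩ := ih w hw
        refine ⟨q, e :: l1, l2, by rw [hsplit]; rfl, ?_⟩
        intro hc
        rcases List.mem_map.mp hc with ⟨a, ha, ha2⟩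
        rcases List.mem_cons.mp ha with h1 | h1
        · exact he (h1 ▸ ha2)
        · exact hnot (List.mem_map.mpr ⟨a, h1, ha2⟩)

-- the A-side minimum scan: the final state is (min xs, first index of min xs)
theorem pvMinFold_eq (xs : List Int) (h : xs ≠ []) :
    ∃ M, pvMinFold xs = (M, ((PySem.List.index? xs M).getD 0)) ∧ M ∈ xs ∧ ∀ y ∈ xs, M ≤ y := by
  obtain ⟨x0, t, rfl⟩ := List.exists_cons_of_ne_nil h
  have hconv : pvMinFold (x0 :: t) =
      (x0 :: t).foldl (fun st x => if x < st.1 then (x, (PySem.List.index? (x0 :: t) x).getD 0) else st)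
        (PySem.List.pyGetD (x0 :: t) 0 0, 0) := by
    unfold pvMinFold
    exact PySem.List.foldl_pyRange_zero_pyGetD (x0 :: t) 0
      (fun st x => if x < st.1 then (x, (PySem.List.index? (x0 :: t) x).getD 0) else st) _
  have hpair : ∀ (l : List Int) (s : Int),
      (l.foldl (fun st x => if x < st.1 then (x, (PySem.List.index? (x0 :: t) x).getD 0) else st)
        (s, (PySem.List.index? (x0 :: t) s).getD 0))
      = (l.foldl min s, (PySem.List.index? (x0 :: t) (l.foldl min s)).getD 0) := by
    intro l
    induction l with
    | nil => intro s; rfl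
    | cons x r ih =>
        intro s
        rw [List.foldl_cons, List.foldl_cons]
        by_cases hx : x < s
        · rw [if_pos hx, ih, min_eq_right (le_of_lt hx)]
        · rw [if_neg hx, ih, min_eq_left (not_lt.mp hx)]
  have hidx0 : (PySem.List.index? (x0 :: t) x0).getD 0 = 0 := by
    rw [PySem.List.index?_cons_self]
    rfl
  have hget0 : PySem.List.pyGetD (x0 :: t) 0 0 = x0 := PySem.List.pyGetD_zero_cons x0 t 0
  refine ⟨(x0 :: t).foldl min x0, ?_, ?_, ?_⟩
  · rw [hconv, hget0]
    have := hpair (x0 :: t) x0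
    rw [hidx0] at this
    exact this
  · rcases PySem.List.foldl_min_mem (x0 :: t) x0 with h1 | h1
    · rw [h1]; exact List.mem_cons_self
    · exact h1
  · exact (PySem.List.foldl_min_le (x0 :: t) x0).2

theorem pvSkip_spec (pos : PySem.Dict Int (List Int)) (start : PySem.Dict Int Int)
    (vals : List Int) (ptr : Nat) :
    ∀ k0 : Nat, ptr ≤ k0 → k0 < vals.length →
    ¬ (start.getD (vals.getD k0 0) 0 = PySem.List.len (pos.getD (vals.getD k0 0) [])) →
    ptr ≤ pvSkip pos start vals ptr ∧ pvSkip pos start vals ptr < vals.length ∧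
    ¬ (start.getD (vals.getD (pvSkip pos start vals ptr) 0) 0
        = PySem.List.len (pos.getD (vals.getD (pvSkip pos start vals ptr) 0) [])) ∧
    ∀ j, ptr ≤ j → j < pvSkip pos start vals ptr →
      start.getD (vals.getD j 0) 0 = PySem.List.len (pos.getD (vals.getD j 0) []) := by
  fun_induction pvSkip pos start vals ptr with
  | case1 ptr h heq ih =>
      intro k0 hk0 hk0l hne
      simp only [PySem.List.pyGetD_natCast] at heq
      have hptrk0 : ptr ≠ k0 := by
        intro hc
        rw [hc] at heq
        exact hne heq
      obtain ⟨a1, a2, a3, a4⟩ := ih k0 (by omega) hk0l hne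
      refine ⟨by omega, a2, a3, ?_⟩
      intro j hj1 hj2
      by_cases hj : j = ptr
      · rw [hj]; exact heq
      · exact a4 j (by omega) hj2
  | case2 ptr h heq =>
      intro k0 hk0 hk0l hne
      simp only [PySem.List.pyGetD_natCast] at heq
      exact ⟨le_refl _, h, heq, fun j h1 h2 => absurd (lt_of_lt_of_le h2 h1) (lt_irrefl j)⟩
  | case3 ptr h =>
      intro k0 hk0 hk0l hne
      exact absurd (lt_of_le_of_lt hk0 hk0l) h

theorem pairwise_lt_getD_mono (lst : List Int) (hs : lst.Pairwise (· < ·))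
    (i j : Nat) (hij : i ≤ j) (hj : j < lst.length) : lst.getD i 0 ≤ lst.getD j 0 := by
  rcases Nat.lt_or_ge i j with h | h
  · rw [List.getD_eq_getElem _ _ (by omega), List.getD_eq_getElem _ _ hj]
    exact le_of_lt ((List.pairwise_iff_getElem.mp hs) i j (by omega) hj h)
  · have : i = j := by omega
    rw [this]

theorem pvFG_spec (lst : List Int) (hs : lst.Pairwise (· < ·)) (p : Int) :
    ∀ (lo hi : Int), 0 ≤ lo → lo ≤ hi → hi ≤ (lst.length : Int) →
    lo ≤ pvFG lst p lo hi ∧ pvFG lst p lo hi ≤ hi ∧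
    (∀ k : Nat, lo ≤ (k : Int) → (k : Int) < pvFG lst p lo hi → lst.getD k 0 ≤ p) ∧
    (pvFG lst p lo hi < hi → p < lst.getD (pvFG lst p lo hi).toNat 0) := by
  intro lo hi
  generalize hn : (hi - lo).toNat = n
  induction n using Nat.strong_induction_on generalizing lo hi with
  | _ n ih =>
    intro h0 h1 h2
    have hr : pvFG lst p lo hi =
        if lo < hi then
          (if p < PySem.List.pyGetD lst (PySem.Int.floordiv (lo + hi) 2) 0 then
            pvFG lst p lo (PySem.Int.floordiv (lo + hi) 2)
          else
            pvFG lst p (PySem.Int.floordiv (lo + hi) 2 + 1) hi)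
        else lo := by
      rw [pvFG]
      split
      · rfl
      · rfl
    by_cases hlh : lo < hi
    · have hmid := PySem.Int.floordiv_two_mid_bounds (le_of_lt hlh)
      have hmidlt : PySem.Int.floordiv (lo + hi) 2 < hi := by
        have : PySem.Int.floordiv (lo + hi) 2 < hi ↔ lo + hi < hi * 2 :=
          PySem.Int.floordiv_lt_iff_lt_mul (by omega)
        omega
      set mid := PySem.Int.floordiv (lo + hi) 2 with hmiddef
      have hmidlen : mid < (lst.length : Int) := by omega
      have hmid0 : 0 ≤ mid := by omega
      have hgetmid : PySem.List.pyGetD lst mid 0 = lst.getD mid.toNat 0 := by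
        rw [PySem.List.pyGetD_eq_getElem lst 0 hmid0 hmidlen]
        rw [List.getD_eq_getElem _ _ (by omega)]
      by_cases hbr : p < PySem.List.pyGetD lst mid 0
      · rw [hr, if_pos hlh, if_pos hbr]
        obtain ⟨a1, a2, a3, a4⟩ := ih (mid - lo).toNat (by omega) lo mid rfl h0 (by omega) (by omega)
        refine ⟨a1, by omega, a3, ?_⟩
        intro hrlt
        rcases lt_or_eq_of_le a2 with h | h
        · exact a4 h
        · rw [h, ← hgetmid]
          exact hbr
      · rw [hr, if_pos hlh, if_neg hbr]
        obtain ⟨b1, b2, b3, b4⟩ := ih (hi - (mid + 1)).toNat (by omega) (mid + 1) hi rfl (by omega) (by omega) h2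
        refine ⟨by omega, b2, ?_, b4⟩
        intro k hk1 hk2
        rcases le_or_gt ((k : Int)) mid with h | h
        · have hkmid : k ≤ mid.toNat := by omega
          have := pairwise_lt_getD_mono lst hs k mid.toNat hkmid (by omega)
          rw [← hgetmid] at this
          omega
        · exact b3 k (by omega) hk2
    · rw [hr, if_neg hlh]
      refine ⟨le_refl _, h1, ?_, ?_⟩
      · intro k hk1 hk2
        omega
      · intro h
        exact absurd h hlh

theorem buildPos_getD_aux (v : Int) : ∀ (l : List (Int × Int)) (d : PySem.Dict Int (List Int)),
    (l.foldl (fun d e => d.modify e.2 [] (fun s => s ++ [e.1])) d).getD v []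
      = d.getD v [] ++ (l.filter (fun e => e.2 == v)).map (fun e => e.1) := by
  intro l
  induction l with
  | nil => intro d; simp
  | cons e t ih =>
      intro d
      rw [List.foldl_cons, ih, List.filter_cons]
      by_cases hv : e.2 = v
      · subst hv
        rw [PySem.Dict.getD_modify, if_pos rfl, if_pos (by simp)]
        simp
      · rw [PySem.Dict.getD_modify]
        rw [if_neg (fun hc => hv hc.symm), if_neg (by simp [hv])]

theorem buildPos_getD (numbers : List Int) (v : Int) :
    (pvBuildPos numbers).getD v [] = posL numbers v := by
  unfold pvBuildPos posL
  rw [buildPos_getD_aux]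
  simp

theorem buildPos_keys (numbers : List Int) :
    (pvBuildPos numbers).keys = PySem.Set.ofList numbers := by
  unfold pvBuildPos
  rw [PySem.Dict.keys_foldl_modify_key]
  rw [PySem.Dict.keys_empty, PySem.List.map_snd_enumerate]
  exact PySem.Set.update_nil_left numbers

theorem buildPos_contains (numbers : List Int) (v : Int) :
    (pvBuildPos numbers).contains v = true ↔ v ∈ numbers := by
  rw [PySem.Dict.contains_iff_mem_keys, buildPos_keys]
  exact PySem.Set.mem_ofList numbers v

theorem buildStart_getD_aux : ∀ (l : List Int) (d : PySem.Dict Int Int),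
    (∀ w, d.getD w 0 = 0) → ∀ v, (l.foldl (fun d v => d.insert v 0) d).getD v 0 = 0 := by
  intro l
  induction l with
  | nil => intro d h v; exact h v
  | cons x t ih =>
      intro d h v
      rw [List.foldl_cons]
      refine ih _ ?_ v
      intro w
      by_cases hw : w = x
      · subst hw; rw [PySem.Dict.getD_insert_self]
      · rw [PySem.Dict.getD_insert_of_ne d 0 0 hw]; exact h w

theorem buildStart_getD (keys : List Int) (v : Int) : (pvBuildStart keys).getD v 0 = 0 :=
  buildStart_getD_aux keys PySem.Dict.empty (fun w => by simp) v

theorem snd_mem_numbers_of_mem_LPf (numbers : List Int) (start : PySem.Dict Int Int)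
    (e : Int × Int) (h : e ∈ LPf numbers start) : e.2 ∈ numbers :=
  snd_mem_of_mem_enum numbers e ((mem_LPf numbers start e).mp h).1

-- the chain loop of B computes exactly the values the A scan collects after the minimum
theorem chain_bridge (numbers : List Int) (start : PySem.Dict Int Int)
    (hnn : ∀ v, 0 ≤ start.getD v 0) (hle : ∀ v, sN start v ≤ (posL numbers v).length) :
    ∀ (n : Nat) (suf pre : List (Int × Int)) (p v : Int),
      n = suf.length →
      LPf numbers start = pre ++ (p, v) :: suf →
      pvChainB (pvBuildPos numbers) start v p
        = chainS v (suf.map (fun e => e.2)) := by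
  intro n
  induction n using Nat.strong_induction_on with
  | _ n ih =>
  intro suf pre p v hn hsplit
  have hpw := LPf_pairwise numbers start
  rw [hsplit, List.pairwise_append] at hpw
  have hsufgt : ∀ e ∈ suf, p < e.1 := (List.pairwise_cons.mp hpw.2.1).1
  have hpwsuf : suf.Pairwise (fun a b => a.1 < b.1) := (List.pairwise_cons.mp hpw.2.1).2
  have hB : pvChainB (pvBuildPos numbers) start v p =
      if (pvBuildPos numbers).contains (v + 1) then
        (if PySem.List.len ((pvBuildPos numbers).getD (v + 1) []) ≤
             pvFirstGreater ((pvBuildPos numbers).getD (v + 1) []) p (start.getD (v + 1) 0) then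
          []
        else
          (v + 1) :: pvChainB (pvBuildPos numbers) start (v + 1)
            (PySem.List.pyGetD ((pvBuildPos numbers).getD (v + 1) [])
              (pvFirstGreater ((pvBuildPos numbers).getD (v + 1) []) p (start.getD (v + 1) 0)) 0))
      else [] := by
    rw [pvChainB]
    split
    · rfl
    · rfl
  by_cases hc : (pvBuildPos numbers).contains (v + 1) = true
  · -- value v+1 occurs somewhere in numbers
    have hlst : (pvBuildPos numbers).getD (v + 1) [] = posL numbers (v + 1) := buildPos_getD numbers (v + 1)
    have hlo0 : 0 ≤ start.getD (v + 1) 0 := hnn (v + 1)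
    have hsNlo : (start.getD (v + 1) 0).toNat = sN start (v + 1) := rfl
    have hlolen : start.getD (v + 1) 0 ≤ ((posL numbers (v + 1)).length : Int) := by
      have := hle (v + 1)
      unfold sN at this
      omega
    obtain ⟨g1, g2, g3, g4⟩ := pvFG_spec (posL numbers (v + 1)) (posL_pairwise numbers (v + 1)) p
      (start.getD (v + 1) 0) ((posL numbers (v + 1)).length : Int) hlo0 hlolen (le_refl _)
    have hFG : pvFirstGreater ((pvBuildPos numbers).getD (v + 1) []) p (start.getD (v + 1) 0)
        = pvFG (posL numbers (v + 1)) p (start.getD (v + 1) 0) ((posL numbers (v + 1)).length : Int) := by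
      unfold pvFirstGreater
      rw [hlst]
      simp [PySem.List.len_eq]
    set j := pvFG (posL numbers (v + 1)) p (start.getD (v + 1) 0) ((posL numbers (v + 1)).length : Int) with hjdef
    -- membership transfer: active positions of v+1 after p are exactly the (·, v+1) pairs of suf
    have hQ1 : ∀ q : Int, q ∈ (posL numbers (v + 1)).drop (sN start (v + 1)) → p < q →
        (q, v + 1) ∈ suf := by
      intro q hq hpq
      have hmem : (q, v + 1) ∈ LPf numbers start := mem_LPf_of_drop numbers start (v + 1) q hq
      rw [hsplit] at hmem
      rcases List.mem_append.mp hmem with h1 | h1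
      · have := hpw.2.2 _ h1 (p, v) List.mem_cons_self
        simp at this
        omega
      · rcases List.mem_cons.mp h1 with h2 | h2
        · have : q = p := congrArg Prod.fst h2
          omega
        · exact h2
    have hQ2 : ∀ q : Int, (q, v + 1) ∈ suf →
        q ∈ (posL numbers (v + 1)).drop (sN start (v + 1)) ∧ p < q := by
      intro q hq
      have hmem : (q, v + 1) ∈ LPf numbers start := by
        rw [hsplit]
        exact List.mem_append_right _ (List.mem_cons_of_mem _ hq)
      exact ⟨((mem_LPf numbers start _).mp hmem).2, hsufgt _ hq⟩
    by_cases hw : (v + 1) ∈ suf.map (fun e => e.2)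
    · obtain ⟨q, l1, l2, hsp, hnotin⟩ := firstSndSplit suf (v + 1) hw
      have hqpair : (q, v + 1) ∈ suf := by
        rw [hsp]
        exact List.mem_append_right _ List.mem_cons_self
      obtain ⟨hqdrop, hqgt⟩ := hQ2 q hqpair
      -- index of q in posL (v+1)
      obtain ⟨i, hi, hieq⟩ := List.mem_iff_getElem.mp hqdrop
      have hilen : sN start (v + 1) + i < (posL numbers (v + 1)).length := by
        have := List.length_drop (l := posL numbers (v + 1)) (i := sN start (v + 1))
        omega
      have hkq : (posL numbers (v + 1)).getD (sN start (v + 1) + i) 0 = q := by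
        rw [List.getD_eq_getElem _ _ hilen, ← List.getElem_drop]
        exact hieq
      -- j does not pass q's index, hence j < len
      have hjk : j ≤ ((sN start (v + 1) + i : Nat) : Int) := by
        by_contra hcj
        have := g3 (sN start (v + 1) + i) (by omega) (by omega)
        rw [hkq] at this
        omega
      have hjlen : j < ((posL numbers (v + 1)).length : Int) := by omega
      have hj0 : 0 ≤ j := le_trans hlo0 g1
      -- the found element equals q
      have hjget : PySem.List.pyGetD ((pvBuildPos numbers).getD (v + 1) []) j 0
          = (posL numbers (v + 1)).getD j.toNat 0 := by
        rw [hlst]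
        exact PySem.List.pyGetD_of_nonneg _ 0 hj0
      have hjq : (posL numbers (v + 1)).getD j.toNat 0 = q := by
        have hjp : p < (posL numbers (v + 1)).getD j.toNat 0 := g4 hjlen
        have hjdropmem : (posL numbers (v + 1)).getD j.toNat 0
            ∈ (posL numbers (v + 1)).drop (sN start (v + 1)) := by
          apply List.mem_iff_getElem.mpr
          refine ⟨j.toNat - sN start (v + 1), ?_, ?_⟩
          · rw [List.length_drop]
            omega
          · rw [List.getElem_drop]
            rw [List.getD_eq_getElem _ _ (by omega)]
            congr 1
            omega
        have hjin : ((posL numbers (v + 1)).getD j.toNat 0, v + 1) ∈ suf :=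
          hQ1 _ hjdropmem hjp
        rw [hsp] at hjin
        have hunify : (posL numbers (v + 1))[j.toNat]?.getD 0
            = (posL numbers (v + 1)).getD j.toNat 0 := rfl
        have hqle : q ≤ (posL numbers (v + 1)).getD j.toNat 0 := by
          rcases List.mem_append.mp hjin with h1 | h1
          · exact absurd (List.mem_map.mpr ⟨_, h1, rfl⟩) hnotin
          · rcases List.mem_cons.mp h1 with h2 | h2
            · have : (posL numbers (v + 1)).getD j.toNat 0 = q := congrArg Prod.fst h2
              omega
            · have hpwsp := hpwsuf
              rw [hsp, List.pairwise_append] at hpwsp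
              have := (List.pairwise_cons.mp hpwsp.2.1).1 _ h2
              simp at this
              omega
        have hlej : (posL numbers (v + 1)).getD j.toNat 0 ≤ q := by
          rw [← hkq]
          exact pairwise_lt_getD_mono _ (posL_pairwise numbers (v + 1)) _ _ (by omega) hilen
        omega
      -- assemble: B recurses, chainS splits
      have hmap : suf.map (fun e => e.2) = l1.map (fun e => e.2) ++ (v + 1) :: l2.map (fun e => e.2) := by
        rw [hsp]
        simp
      rw [hB, if_pos hc, if_neg (by rw [hFG]; simp [hlst, PySem.List.len_eq]; omega)]
      rw [hFG, hjget, hjq]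
      have hsplit' : LPf numbers start = (pre ++ (p, v) :: l1) ++ (q, v + 1) :: l2 := by
        rw [hsplit, hsp]
        simp
      have hrec := ih l2.length (by rw [hn, hsp]; simp; omega) l2 (pre ++ (p, v) :: l1)
        q (v + 1) rfl hsplit'
      rw [hrec, hmap, chainS_split _ _ _ (by simpa using hnotin)]
    · -- no occurrence of v+1 after p: FG runs off the end, B stops
      have hjlen : ((posL numbers (v + 1)).length : Int) ≤ j := by
        by_contra hcj
        have hcj' : j < ((posL numbers (v + 1)).length : Int) := lt_of_not_ge hcj
        have hjp : p < (posL numbers (v + 1)).getD j.toNat 0 := g4 hcj'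
        have hj0 : 0 ≤ j := le_trans hlo0 g1
        have hjdropmem : (posL numbers (v + 1)).getD j.toNat 0
            ∈ (posL numbers (v + 1)).drop (sN start (v + 1)) := by
          apply List.mem_iff_getElem.mpr
          refine ⟨j.toNat - sN start (v + 1), ?_, ?_⟩
          · rw [List.length_drop]
            have := g1
            unfold sN
            omega
          · rw [List.getElem_drop]
            rw [List.getD_eq_getElem _ _ (by omega)]
            congr 1
            have := g1
            unfold sN
            omega
        have := hQ1 _ hjdropmem hjp
        exact hw (List.mem_map.mpr ⟨_, this, rfl⟩)
      rw [hB, if_pos hc, if_pos (by rw [hFG]; simp [hlst, PySem.List.len_eq]; omega)]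
      rw [chainS_none _ _ hw]
  · -- v+1 does not occur in numbers at all
    have hnotnum : (v + 1) ∉ numbers := by
      intro hcn
      exact hc ((buildPos_contains numbers (v + 1)).mpr hcn)
    have hnot : (v + 1) ∉ suf.map (fun e => e.2) := by
      intro hcm
      rcases List.mem_map.mp hcm with ⟨e, he, he2⟩
      have : e ∈ LPf numbers start := by
        rw [hsplit]
        exact List.mem_append_right _ (List.mem_cons_of_mem _ he)
      exact hnotnum (he2 ▸ snd_mem_numbers_of_mem_LPf numbers start e this)
    rw [hB, if_neg (by simpa using hc), chainS_none _ _ hnot]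

def valsOf (numbers : List Int) : List Int :=
  PySem.List.sorted (pvBuildPos numbers).keys (fun x => x) false

theorem valsOf_pairwise (numbers : List Int) : (valsOf numbers).Pairwise (· < ·) := by
  unfold valsOf
  rw [buildPos_keys]
  exact PySem.List.sorted_ofList_pairwise_lt numbers

theorem valsOf_mem (numbers : List Int) (v : Int) : v ∈ valsOf numbers ↔ v ∈ numbers := by
  unfold valsOf
  rw [PySem.List.mem_sorted, buildPos_keys]
  exact PySem.Set.mem_ofList numbers v

theorem pairwise_lt_getD_strict (lst : List Int) (hs : lst.Pairwise (· < ·))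
    (i j : Nat) (hij : i < j) (hj : j < lst.length) : lst.getD i 0 < lst.getD j 0 := by
  rw [List.getD_eq_getElem _ _ (by omega), List.getD_eq_getElem _ _ hj]
  exact (List.pairwise_iff_getElem.mp hs) i j (by omega) hj hij

theorem exh_iff (numbers : List Int) (start : PySem.Dict Int Int)
    (hnn : ∀ v, 0 ≤ start.getD v 0) (v : Int) :
    (start.getD v 0 = PySem.List.len ((pvBuildPos numbers).getD v []))
      ↔ sN start v = (posL numbers v).length := by
  rw [buildPos_getD, PySem.List.len_eq]
  unfold sN
  have := hnn v
  omega

-- the full round-by-round simulation of A's loop by B's loop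
theorem rounds_bridge (numbers : List Int) :
    ∀ (n : Nat) (start : PySem.Dict Int Int) (ptr : Nat) (subs : List (List Int)),
      n = (absL numbers start).length →
      (∀ v, 0 ≤ start.getD v 0) →
      (∀ v, sN start v ≤ (posL numbers v).length) →
      (∀ j : Nat, j < ptr → j < (valsOf numbers).length →
        sN start ((valsOf numbers).getD j 0) = (posL numbers ((valsOf numbers).getD j 0)).length) →
      pvRoundsA (absL numbers start) subs ((subs.length : Int))
        = (pvRoundsB (pvBuildPos numbers) (valsOf numbers) start subs (((absL numbers start).length : Int)) ptr,
           ((pvRoundsB (pvBuildPos numbers) (valsOf numbers) start subs (((absL numbers start).length : Int)) ptr).length : Int)) := by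
  intro n
  induction n using Nat.strong_induction_on with
  | _ n ih =>
  intro start ptr subs hn hnn hle hptr
  by_cases hxs : absL numbers start = []
  · rw [hxs]
    rw [pvRoundsA, dif_neg (by simp)]
    rw [pvRoundsB, dif_neg (by simp)]
  · have hposA : 0 < (absL numbers start).length := List.length_pos_of_ne_nil hxs
    have hLne : LPf numbers start ≠ [] := by
      intro hc
      apply hxs
      unfold absL
      rw [hc]
      rfl
    obtain ⟨e0, he0⟩ := List.exists_mem_of_ne_nil _ hLne
    have he0L := (mem_LPf numbers start e0).mp he0
    have he0drop : (posL numbers e0.2).drop (sN start e0.2) ≠ [] := List.ne_nil_of_mem he0L.2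
    have he0num : e0.2 ∈ numbers := snd_mem_of_mem_enum numbers e0 he0L.1
    obtain ⟨k0, hk0len, hk0⟩ := List.mem_iff_getElem.mp ((valsOf_mem numbers e0.2).mpr he0num)
    have hk0' : (valsOf numbers).getD k0 0 = e0.2 := by
      rw [List.getD_eq_getElem _ _ hk0len, hk0]
    have hk0ne : ¬ (start.getD ((valsOf numbers).getD k0 0) 0
        = PySem.List.len ((pvBuildPos numbers).getD ((valsOf numbers).getD k0 0) [])) := by
      rw [exh_iff numbers start hnn, hk0']
      intro hcE
      exact he0drop (List.drop_eq_nil_of_le (by omega))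
    have hk0ptr : ptr ≤ k0 := by
      by_contra hc
      have := hptr k0 (by omega) hk0len
      rw [hk0'] at this
      exact he0drop (List.drop_eq_nil_of_le (by omega))
    obtain ⟨s1, s2, s3, s4⟩ :=
      pvSkip_spec (pvBuildPos numbers) start (valsOf numbers) ptr k0 hk0ptr hk0len hk0ne
    obtain ⟨k, hkdef⟩ : ∃ k, pvSkip (pvBuildPos numbers) start (valsOf numbers) ptr = k := ⟨_, rfl⟩
    rw [hkdef] at s1 s2 s3 s4
    obtain ⟨m, hmdef⟩ : ∃ m, (valsOf numbers).getD k 0 = m := ⟨_, rfl⟩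
    rw [hmdef] at s3
    have hmnum : m ∈ numbers := by
      rw [← hmdef, List.getD_eq_getElem _ _ s2]
      exact (valsOf_mem numbers _).mp (List.getElem_mem s2)
    have hmdrop : (posL numbers m).drop (sN start m) ≠ [] := by
      intro hc
      have hlc : (posL numbers m).length ≤ sN start m := by
        have := congrArg List.length hc
        simp at this
        omega
      have hmexh : sN start m = (posL numbers m).length := by
        have := hle m
        omega
      exact s3 ((exh_iff numbers start hnn m).mpr hmexh)
    obtain ⟨La, Lb, hsplitm, hneU, hlt, hgt, hdropm⟩ := firstPairSplit numbers start m hmdrop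
    obtain ⟨p0, hp0def⟩ : ∃ p, (posL numbers m).getD (sN start m) 0 = p := ⟨_, rfl⟩
    rw [hp0def] at hsplitm hdropm
    obtain ⟨sub, hsubdef⟩ : ∃ s, m :: chainS m (Lb.map (fun e => e.2)) = s := ⟨_, rfl⟩
    have hxs_split : absL numbers start = La.map (fun e => e.2) ++ m :: Lb.map (fun e => e.2) := by
      unfold absL
      rw [hsplitm]
      simp
    have hm_mem_xs : m ∈ absL numbers start := by
      rw [hxs_split]
      exact List.mem_append_right _ List.mem_cons_self
    obtain ⟨M, hminfold, hMmem, hMle⟩ := pvMinFold_eq (absL numbers start) hxs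
    have hMm : M = m := by
      refine le_antisymm (hMle m hm_mem_xs) ?_
      obtain ⟨eM, heM, heM2⟩ := List.mem_map.mp hMmem
      have heML := (mem_LPf numbers start eM).mp heM
      have heMdrop : (posL numbers eM.2).drop (sN start eM.2) ≠ [] := List.ne_nil_of_mem heML.2
      have heMnum : eM.2 ∈ numbers := snd_mem_of_mem_enum numbers eM heML.1
      obtain ⟨kM, hkMlen, hkMget⟩ := List.mem_iff_getElem.mp ((valsOf_mem numbers eM.2).mpr heMnum)
      have hkMget' : (valsOf numbers).getD kM 0 = eM.2 := by
        rw [List.getD_eq_getElem _ _ hkMlen, hkMget]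
      have hkMge : k ≤ kM := by
        by_contra hck
        have hexh : sN start ((valsOf numbers).getD kM 0)
            = (posL numbers ((valsOf numbers).getD kM 0)).length := by
          rcases Nat.lt_or_ge kM ptr with hcase | hcase
          · exact hptr kM hcase hkMlen
          · exact (exh_iff numbers start hnn _).mp (s4 kM hcase (by omega))
        rw [hkMget'] at hexh
        exact heMdrop (List.drop_eq_nil_of_le (by omega))
      have hmono : (valsOf numbers).getD k 0 ≤ (valsOf numbers).getD kM 0 :=
        pairwise_lt_getD_mono _ (valsOf_pairwise numbers) k kM hkMge hkMlen
      rw [hmdef, hkMget', heM2] at hmono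
      exact hmono
    subst hMm
    have hidx : (PySem.List.index? (absL numbers start) M).getD 0 = La.length := by
      have hsome : PySem.List.index? (absL numbers start) M = some (La.map (fun e => e.2)).length := by
        apply (PySem.List.index?_eq_some_iff _ _ _).mpr
        refine ⟨La.map (fun e => e.2), Lb.map (fun e => e.2), hxs_split, rfl, ?_⟩
        intro hc
        obtain ⟨e, he, he2⟩ := List.mem_map.mp hc
        exact hneU e he he2
      rw [hsome]
      simp
    have hdropxs : (absL numbers start).drop La.length = M :: Lb.map (fun e => e.2) := by
      rw [hxs_split]
      rw [show La.length = (La.map (fun e => e.2)).length by simp]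
      exact List.drop_left
    have hsubA : (pvMinFold (absL numbers start)).1 ::
        pvChainA (absL numbers start) (pvMinFold (absL numbers start)).2
          (pvMinFold (absL numbers start)).1 = sub := by
      rw [hminfold]
      show M :: pvChainA (absL numbers start) ((PySem.List.index? (absL numbers start) M).getD 0) M = sub
      rw [hidx, pvChainA_eq, hdropxs, ← hsubdef]
      rw [chainS]
      rw [if_neg (by omega)]
    have hposB : (0:Int) < ((absL numbers start).length : Int) := by exact_mod_cast hposA
    have hkval : PySem.List.pyGetD (valsOf numbers) ((k : Nat) : Int) 0 = M := by
      rw [PySem.List.pyGetD_natCast]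
      exact hmdef
    have hpval : PySem.List.pyGetD ((pvBuildPos numbers).getD M []) (start.getD M 0) 0 = p0 := by
      rw [buildPos_getD, PySem.List.pyGetD_of_nonneg _ 0 (hnn M)]
      exact hp0def
    have hchainB : M :: pvChainB (pvBuildPos numbers) start M p0 = sub := by
      have hcb := chain_bridge numbers start hnn hle Lb.length Lb La p0 M rfl hsplitm
      rw [hcb, ← hsubdef]
    have hchain_nodup : sub.Nodup := by
      rw [← hsubdef]
      exact List.Pairwise.imp ne_of_lt
        (List.pairwise_cons.mpr ⟨fun w hw => chainS_gt _ _ _ hw, chainS_pairwise _ _⟩)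
    have hchain_act : ∀ u ∈ sub, (posL numbers u).drop (sN start u) ≠ [] := by
      intro u hu
      rw [← hsubdef] at hu
      rcases List.mem_cons.mp hu with h1 | h1
      · rw [h1]
        exact hmdrop
      · have h2 : u ∈ Lb.map (fun e => e.2) := chainS_sub _ _ h1
        obtain ⟨e, he, he2⟩ := List.mem_map.mp h2
        have heL : e ∈ LPf numbers start := by
          rw [hsplitm]
          exact List.mem_append_right _ (List.mem_cons_of_mem _ he)
        rw [← he2]
        exact List.ne_nil_of_mem ((mem_LPf numbers start e).mp heL).2
    obtain ⟨r1, r2, r3, r4, r5⟩ := removeAll_bridge numbers sub start hchain_nodup hchain_act hnn hle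
    obtain ⟨start', hstart'def⟩ :
        ∃ d, sub.foldl (fun d u => d.insert u (d.getD u 0 + 1)) start = d := ⟨_, rfl⟩
    rw [hstart'def] at r1 r2 r3 r4 r5
    have hptr' : ∀ j : Nat, j < k → j < (valsOf numbers).length →
        sN start' ((valsOf numbers).getD j 0) = (posL numbers ((valsOf numbers).getD j 0)).length := by
      intro j hj hjlen
      have hltm : (valsOf numbers).getD j 0 < M := by
        rw [← hmdef]
        exact pairwise_lt_getD_strict _ (valsOf_pairwise numbers) j k hj s2
      have hnotin : (valsOf numbers).getD j 0 ∉ sub := by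
        rw [← hsubdef]
        intro hc
        rcases List.mem_cons.mp hc with h1 | h1
        · omega
        · have := chainS_gt _ _ _ h1
          omega
      have hsame : start'.getD ((valsOf numbers).getD j 0) 0
          = start.getD ((valsOf numbers).getD j 0) 0 := r4 _ hnotin
      have hexh : sN start ((valsOf numbers).getD j 0)
          = (posL numbers ((valsOf numbers).getD j 0)).length := by
        rcases Nat.lt_or_ge j ptr with hc | hc
        · exact hptr j hc hjlen
        · exact (exh_iff numbers start hnn _).mp (s4 j hc hj)
      unfold sN
      rw [hsame]
      exact hexh
    have hAstep : pvRoundsA (absL numbers start) subs ((subs.length : Int))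
        = pvRoundsA (pvRemoveAll (absL numbers start) sub) (subs ++ [sub]) ((subs.length : Int) + 1) := by
      rw [pvRoundsA, dif_pos hposA]
      simp only []
      rw [hsubA]
    have hBstep : pvRoundsB (pvBuildPos numbers) (valsOf numbers) start subs
          (((absL numbers start).length : Int)) ptr
        = pvRoundsB (pvBuildPos numbers) (valsOf numbers) start' (subs ++ [sub])
            ((((absL numbers start).length : Int)) - PySem.List.len sub) k := by
      rw [pvRoundsB, dif_pos hposB]
      simp only []
      rw [hkdef, hkval, hpval, hchainB, hstart'def]
    have hsublen1 : 1 ≤ sub.length := by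
      rw [← hsubdef]
      simp
    have hremlen : (((absL numbers start).length : Int)) - PySem.List.len sub
        = ((absL numbers start').length : Int) := by
      simp only [PySem.List.len_eq]
      omega
    have hIH := ih ((absL numbers start').length) (by omega) start' k (subs ++ [sub])
      rfl r3 r5 hptr'
    have hcnt : (((subs ++ [sub]).length : Nat) : Int) = (subs.length : Int) + 1 := by
      simp
    rw [hcnt] at hIH
    rw [hAstep, r1, hBstep, hremlen]
    exact hIH

theorem habs_start0 (numbers : List Int) :
    absL numbers (pvBuildStart (pvBuildPos numbers).keys) = numbers := by
  unfold absL LPf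
  rw [List.filter_eq_self.mpr ?_, PySem.List.map_snd_enumerate]
  intro e he
  simp only [actE]
  apply decide_eq_true
  have hs0 : sN (pvBuildStart (pvBuildPos numbers).keys) e.2 = 0 := by
    unfold sN
    rw [buildStart_getD]
    rfl
  rw [hs0, List.drop_zero]
  exact (mem_posL numbers e.2 e.1).mpr (by simpa using he)

-- ===== VERDICT (by name: the statement is the Claim_ definition above) =====
theorem find_rounds_spec : Claim_equal_find_rounds := by
  intro numbers _
  unfold Spec_find_rounds find_rounds find_rounds_alt
  have h0nn : ∀ v, 0 ≤ (pvBuildStart (pvBuildPos numbers).keys).getD v 0 := by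
    intro v
    rw [buildStart_getD]
  have h0le : ∀ v, sN (pvBuildStart (pvBuildPos numbers).keys) v ≤ (posL numbers v).length := by
    intro v
    unfold sN
    rw [buildStart_getD]
    simp
  have h0ptr : ∀ j : Nat, j < 0 → j < (valsOf numbers).length →
      sN (pvBuildStart (pvBuildPos numbers).keys) ((valsOf numbers).getD j 0)
        = (posL numbers ((valsOf numbers).getD j 0)).length := by
    intro j hj _
    omega
  have hbr := rounds_bridge numbers ((absL numbers (pvBuildStart (pvBuildPos numbers).keys)).length)
    (pvBuildStart (pvBuildPos numbers).keys) 0 [] rfl h0nn h0le h0ptr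
  rw [habs_start0] at hbr
  simp only [List.length_nil, Nat.cast_zero] at hbr
  show pvRoundsA numbers [] 0
      = (pvRoundsB (pvBuildPos numbers) (valsOf numbers) (pvBuildStart (pvBuildPos numbers).keys) []
          (PySem.List.len numbers) 0,
        PySem.List.len (pvRoundsB (pvBuildPos numbers) (valsOf numbers)
          (pvBuildStart (pvBuildPos numbers).keys) [] (PySem.List.len numbers) 0))
  simp only [PySem.List.len_eq]
  exact hbr
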